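-- pv_equiv track=rewrite | github.com/BilaLamouYannick/sPay-webApp | OAuth/signals.py | get_number_card
-- ===== SOURCE A (Python) =====
-- def get_number_card(uid_wallet):
--     card_number = list()
--     card = list()
--     number = ''.join(ch for ch in uid_wallet if ch.isnumeric())
--     i = 0
--     for el in number:
--         card.append(el)
--         i += 1
--         if len(card) == 4:
--             text = "".join(card)
--             card = list()
--             card_number.append(text)
--
--     card_number = " ".join(card_number)
--     return card_number
-- ===== SOURCE B (Python) =====
-- def get_number_card(uid_wallet):
--     number = ''.join(ch for ch in uid_wallet if ch.isnumeric())
--     return ' '.join(number[i:i + 4] for i in range(0, len(number) - len(number) % 4, 4))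
-- ===== Notes on version B (the rewrite author's own statement) =====
-- stated objective: simpler
-- what changed: Replaces the flush-at-4 buffer/accumulator loop with direct slicing of the digit string into complete 4-character blocks by stepping an index by 4.
import Mathlib
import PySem

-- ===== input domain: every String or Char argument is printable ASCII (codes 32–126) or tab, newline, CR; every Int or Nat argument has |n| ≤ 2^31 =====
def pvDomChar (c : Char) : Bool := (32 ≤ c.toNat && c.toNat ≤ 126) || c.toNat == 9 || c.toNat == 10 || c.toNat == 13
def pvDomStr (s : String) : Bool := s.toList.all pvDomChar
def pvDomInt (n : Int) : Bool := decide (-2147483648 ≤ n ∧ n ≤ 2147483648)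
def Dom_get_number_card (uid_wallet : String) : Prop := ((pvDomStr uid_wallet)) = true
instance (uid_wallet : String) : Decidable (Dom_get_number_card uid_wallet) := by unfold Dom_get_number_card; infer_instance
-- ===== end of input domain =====

-- B replaces A's flush-at-4 buffer loop by slicing the digit string into complete 4-char blocks directly (simpler decomposition, same cost).


-- ===== PORT A =====
-- ch.isnumeric() coincides with '0' ≤ ch ≤ '9' on the ASCII domain → PySem.Chars.isdigit
-- the loop's step: card.append(el); i += 1; if len(card) == 4: flush card into card_number
def pvStepA (st : List (List Char) × List Char × Int) (el : Char) :
    List (List Char) × List Char × Int :=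
  let card := st.2.1 ++ [el]
  let i := st.2.2 + 1
  if card.length == 4 then (st.1 ++ [card], [], i) else (st.1, card, i)

def get_number_card (uid_wallet : String) : String :=
  let number := uid_wallet.toList.filter PySem.Chars.isdigit
  let st := number.foldl pvStepA ([], [], 0)
  String.mk (PySem.Chars.join [' '] st.1)

-- ===== PORT B =====
def get_number_card_alt (uid_wallet : String) : String :=
  let number := uid_wallet.toList.filter PySem.Chars.isdigit
  let n : Int := number.length
  let blocks := (PySem.List.pyRange 0 (n - PySem.Int.mod n 4) 4).map
      (fun i => PySem.Chars.slice number (some i) (some (i + 4)))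
  String.mk (PySem.Chars.join [' '] blocks)

-- ===== PRECONDITION & SPEC =====
def Spec_get_number_card (uid_wallet : String) (out : String) : Prop := out = get_number_card_alt uid_wallet
instance (uid_wallet : String) (out : String) : Decidable (Spec_get_number_card uid_wallet out) := by unfold Spec_get_number_card; infer_instance

-- ===== CLAIM (what is proved, stated in full; the proofs are below) =====
def Claim_equal_get_number_card : Prop := ∀ (uid_wallet : String), Dom_get_number_card uid_wallet → Spec_get_number_card uid_wallet (get_number_card uid_wallet)

-- ===== LEMMAS AND PROOFS =====

-- proof-only helper: the list of complete 4-blocks of ds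
def pvChunk4 (ds : List Char) : List (List Char) :=
  if h : 4 ≤ ds.length then ds.take 4 :: pvChunk4 (ds.drop 4) else []
termination_by ds.length
decreasing_by simp; omega

theorem pvChunk4_of_ge (ds : List Char) (h : 4 ≤ ds.length) :
    pvChunk4 ds = ds.take 4 :: pvChunk4 (ds.drop 4) := by
  rw [pvChunk4]; simp [h]

theorem pvChunk4_of_lt (ds : List Char) (h : ds.length < 4) : pvChunk4 ds = [] := by
  rw [pvChunk4]; simp [Nat.not_le.mpr h]

-- A's fold accumulates exactly the complete 4-blocks of (card ++ ds)
theorem foldA_eq (ds : List Char) :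
    ∀ (cn : List (List Char)) (card : List Char) (i : Int), card.length < 4 →
      (ds.foldl pvStepA (cn, card, i)).1 = cn ++ pvChunk4 (card ++ ds) := by
  induction ds with
  | nil =>
    intro cn card i h
    simp [List.foldl, pvChunk4_of_lt card (by simpa using h)]
  | cons d ds ih =>
    intro cn card i h
    by_cases h3 : card.length = 3
    · have hstep : pvStepA (cn, card, i) d = (cn ++ [card ++ [d]], [], i + 1) := by
        have h4 : ((card ++ [d]).length == 4) = true := by simp [h3]
        simp only [pvStepA, if_pos h4]
      have hlen : (card ++ [d]).length = 4 := by simp [h3]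
      rw [List.foldl_cons, hstep, ih (cn ++ [card ++ [d]]) [] (i + 1) (by simp)]
      have hassoc : card ++ d :: ds = (card ++ [d]) ++ ds := by simp
      rw [hassoc, pvChunk4_of_ge ((card ++ [d]) ++ ds)
            (by rw [List.length_append, hlen]; omega),
          List.take_left' hlen, List.drop_left' hlen]
      simp
    · have hstep : pvStepA (cn, card, i) d = (cn, card ++ [d], i + 1) := by
        have hne : ¬((card ++ [d]).length == 4) = true := by simp; omega
        simp only [pvStepA, if_neg hne]
      rw [List.foldl_cons, hstep, ih cn (card ++ [d]) (i + 1) (by simp; omega)]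
      simp

-- B's range-of-slices is the same list of blocks
theorem rangeBlocks_eq (q : Nat) :
    ∀ ds : List Char, q = ds.length / 4 →
      (List.range q).map (fun k => (ds.drop (4 * k)).take 4) = pvChunk4 ds := by
  induction q with
  | zero =>
    intro ds hq
    have : ds.length < 4 := by omega
    simp [pvChunk4_of_lt ds this]
  | succ q ih =>
    intro ds hq
    have h4 : 4 ≤ ds.length := by omega
    have hq' : q = (ds.drop 4).length / 4 := by simp; omega
    rw [List.range_succ_eq_map, pvChunk4_of_ge ds h4, ← ih (ds.drop 4) hq']
    simp only [List.map_cons, List.map_map, Nat.mul_zero, List.drop_zero]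
    congr 1
    refine List.map_congr_left fun k _ => ?_
    simp only [Function.comp_def, List.drop_drop]
    congr 2
    omega

theorem blocksB_eq (ds : List Char) :
    (PySem.List.pyRange 0 ((ds.length : Int) - PySem.Int.mod (ds.length : Int) 4) 4).map
        (fun i => PySem.Chars.slice ds (some i) (some (i + 4))) = pvChunk4 ds := by
  rw [PySem.List.pyRange_of_pos _ _ (by norm_num)]
  have hfm : PySem.Int.mod (ds.length : Int) 4 = (ds.length : Int) % 4 := by
    simp [PySem.Int.mod, Int.fmod_eq_emod]
  have hcount : (if (0:Int) < (ds.length : Int) - PySem.Int.mod (ds.length : Int) 4 then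
      (((ds.length : Int) - PySem.Int.mod (ds.length : Int) 4 - 0 + 4 - 1) / 4).toNat else 0)
      = ds.length / 4 := by
    rw [hfm]
    split_ifs with h
    · omega
    · omega
  rw [hcount, List.map_map, ← rangeBlocks_eq (ds.length / 4) ds rfl]
  refine List.map_congr_left fun k hk => ?_
  have hk' : k < ds.length / 4 := List.mem_range.mp hk
  simp only [Function.comp_def, zero_add]
  have : (4 : Int) * (k : Int) = ((4 * k : Nat) : Int) := by push_cast; ring
  rw [this]
  have h4 : ((4 * k : Nat) : Int) + 4 = ((4 * k : Nat) : Int) + ((4 : Nat) : Int) := by norm_num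
  rw [h4, PySem.Chars.slice, PySem.List.slice_natCast_add]

-- ===== VERDICT (by name: the statement is the Claim_ definition above) =====
theorem get_number_card_spec : Claim_equal_get_number_card := by
  intro uid_wallet _
  unfold Spec_get_number_card get_number_card get_number_card_alt
  have hA := foldA_eq (uid_wallet.toList.filter PySem.Chars.isdigit) [] [] 0 (by simp)
  have hB := blocksB_eq (uid_wallet.toList.filter PySem.Chars.isdigit)
  simp only [List.nil_append] at hA
  simp only [hA, hB]
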